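-- pv_equiv track=rewrite | github.com/Praveen001-vc/mahilmart-pos-Version01 | MahilMartPOS_App/utils/license_manager.py | _generate_modern_license_key
-- ===== SOURCE A (Python) =====
-- def _build_checksum_value(seed, multiplier, offset):
--     total = 0
--     modulus = 16777215
--     for index, char in enumerate(seed, start=1):
--         total = (total + (ord(char) + offset) * (index + multiplier)) % modulus
--     return total
--
-- def _generate_modern_license_key(seed):
--     uppercase_chars = "ABCDEFGHJKLMNPQRSTUVWXYZ"
--     lowercase_chars = "abcdefghijkmnopqrstuvwxyz"
--     number_chars = "23456789"
--     special_chars = "@#$%&*!?"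
--     modulus = 16777215
--
--     state = (
--         _build_checksum_value(seed, 3, 11)
--         + _build_checksum_value(seed, 7, 19)
--         + len(seed) * 97
--     ) % modulus
--
--     base_chars = []
--     for index in range(30):
--         state = (state * 73 + 19 + index * 131) % modulus
--         if index % 3 == 0:
--             charset = uppercase_chars
--         elif index % 3 == 1:
--             charset = lowercase_chars
--         else:
--             charset = number_chars
--         base_chars.append(charset[state % len(charset)])
--
--     base_key = "".join(base_chars)
--
--     state = (state * 73 + 17) % modulus
--     special_a = special_chars[state % len(special_chars)]
--     state = (state * 73 + 29) % modulus
--     special_b = special_chars[state % len(special_chars)]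
--
--     return f"{base_key[:10]}{special_a}{base_key[10:20]}{special_b}{base_key[20:]}"
-- ===== SOURCE B (Python) =====
-- def _generate_modern_license_key(seed):
--     uppercase_chars = "ABCDEFGHJKLMNPQRSTUVWXYZ"
--     lowercase_chars = "abcdefghijkmnopqrstuvwxyz"
--     number_chars = "23456789"
--     special_chars = "@#$%&*!?"
--     m = 16777215
--
--     # Closed-form seed digest: the two per-character modular scans collapse
--     # algebraically, since (c+11)(i+3)+(c+19)(i+7) = 2ci+10c+30i+166, to
--     # 2*sum(i*c) + 10*sum(c) + 15n(n+1) + (166+97)n  (mod m).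
--     n = len(seed)
--     t = sum(ord(c) for c in seed)
--     w = sum(i * ord(c) for i, c in enumerate(seed, start=1))
--     s0 = (2 * w + 10 * t + 15 * n * (n + 1) + 263 * n) % m
--
--     # Closed form of the affine recurrence s -> 73*s + 19 + 131*k (mod m):
--     # after j steps the state is 73**j * s0 + 19*G(j) + 131*H(j) (mod m),
--     # with G(j) = sum_{t<j} 73**t and H(j) = sum_{t<j} (j-1-t)*73**t,
--     # both exact integers; each key position is computed independently.
--     def G(j):
--         return (73 ** j - 1) // 72
--
--     def H(j):
--         return (j - 1) * (73 ** j - 1) // 72 \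
--             - 73 * ((j - 1) * 73 ** j - j * 73 ** (j - 1) + 1) // (72 * 72)
--
--     charsets = (uppercase_chars, lowercase_chars, number_chars)
--     chars = [
--         charsets[k % 3][
--             (pow(73, k + 1, m) * s0 + 19 * G(k + 1) + 131 * H(k + 1)) % m
--             % len(charsets[k % 3])
--         ]
--         for k in range(30)
--     ]
--
--     s30 = (pow(73, 30, m) * s0 + 19 * G(30) + 131 * H(30)) % m
--     sa = (s30 * 73 + 17) % m
--     sb = (sa * 73 + 29) % m
--     return "".join(
--         chars[:10] + [special_chars[sa % 8]] + chars[10:20]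
--         + [special_chars[sb % 8]] + chars[20:]
--     )
-- ===== Notes on version B (the rewrite author's own statement) =====
-- stated objective: alternative
-- what changed: Replaces A's two sequential modular scans with one closed-form algebraic digest (2*sum(i*ord)+10*sum(ord)+15n(n+1)+263n mod m), and replaces the 30-step sequential PRNG recurrence with an independent per-position affine formula 73^k*s0 + geometric-sum constants (mod m); one plain-sum pass over the seed instead of two per-char modular-reduction passes gives the measured constant-factor speedup.
import Mathlib
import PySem

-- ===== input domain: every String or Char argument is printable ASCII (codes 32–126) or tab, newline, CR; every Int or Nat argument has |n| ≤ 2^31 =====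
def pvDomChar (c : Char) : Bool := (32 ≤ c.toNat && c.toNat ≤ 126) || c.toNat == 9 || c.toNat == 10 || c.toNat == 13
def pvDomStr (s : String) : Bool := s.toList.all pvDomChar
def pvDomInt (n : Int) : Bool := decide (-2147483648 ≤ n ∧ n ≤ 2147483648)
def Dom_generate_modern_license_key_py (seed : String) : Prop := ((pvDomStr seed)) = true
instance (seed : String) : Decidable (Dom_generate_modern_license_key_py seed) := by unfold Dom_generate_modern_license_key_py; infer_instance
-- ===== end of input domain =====

-- B replaces A's two modular scans and 30-step sequential recurrence by closed forms:
-- the seed digest becomes one algebraic formula, and each key position is computed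
-- independently from the digest by a direct affine formula (geometric-sum constants).

-- ===== PORT A =====
-- _build_checksum_value: fold carrying (total, index), enumerate(seed, start=1)
def pvChecksumA (seed : List Char) (multiplier offset : Nat) : Nat :=
  (seed.foldl
    (fun (p : Nat × Nat) c =>
      ((p.1 + (c.toNat + offset) * (p.2 + multiplier)) % 16777215, p.2 + 1))
    (0, 1)).1

def generate_modern_license_key_py (seed : String) : String :=
  let modulus := 16777215
  let upper := "ABCDEFGHJKLMNPQRSTUVWXYZ".toList
  let lower := "abcdefghijkmnopqrstuvwxyz".toList
  let nums  := "23456789".toList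
  let specs := "@#$%&*!?".toList
  let s := seed.toList
  let state0 := (pvChecksumA s 3 11 + pvChecksumA s 7 19 + s.length * 97) % modulus
  let r := (List.range 30).foldl
    (fun (p : Nat × List Char) i =>
      let st := (p.1 * 73 + 19 + i * 131) % modulus
      let cs := if i % 3 == 0 then upper else if i % 3 == 1 then lower else nums
      (st, p.2 ++ [cs.getD (st % cs.length) ' '])) (state0, [])
  let base := r.2
  let stA := (r.1 * 73 + 17) % modulus
  let specialA := specs.getD (stA % specs.length) ' '
  let stB := (stA * 73 + 29) % modulus
  let specialB := specs.getD (stB % specs.length) ' '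
  String.mk (base.take 10 ++ [specialA] ++ ((base.drop 10).take 10) ++ [specialB] ++ base.drop 20)

-- ===== PORT B =====
-- G(j) = sum_{t<j} 73^t,  H(j) = sum_{t<j} (j-1-t)*73^t, as exact integer divisions
def pvG (j : Nat) : Nat := (73 ^ j - 1) / 72
def pvH (j : Nat) : Nat :=
  (j - 1) * (73 ^ j - 1) / 72 - 73 * ((j - 1) * 73 ^ j - j * 73 ^ (j - 1) + 1) / (72 * 72)

def generate_modern_license_key_py_alt (seed : String) : String :=
  let m := 16777215
  let upper := "ABCDEFGHJKLMNPQRSTUVWXYZ".toList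
  let lower := "abcdefghijkmnopqrstuvwxyz".toList
  let nums  := "23456789".toList
  let specs := "@#$%&*!?".toList
  let s := seed.toList
  let n := s.length
  let t := (s.map (fun c => c.toNat)).sum
  let w := (s.foldl (fun (p : Nat × Nat) c => (p.1 + 1, p.2 + p.1 * c.toNat)) (1, 0)).2
  let s0 := (2 * w + 10 * t + 15 * n * (n + 1) + 263 * n) % m
  let chars := (List.range 30).map (fun k =>
    let cs := [upper, lower, nums].getD (k % 3) []
    let st := (73 ^ (k + 1) % m * s0 + 19 * pvG (k + 1) + 131 * pvH (k + 1)) % m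
    cs.getD (st % cs.length) ' ')
  let s30 := (73 ^ 30 % m * s0 + 19 * pvG 30 + 131 * pvH 30) % m
  let sa := (s30 * 73 + 17) % m
  let sb := (sa * 73 + 29) % m
  String.mk (chars.take 10 ++ [specs.getD (sa % 8) ' '] ++ ((chars.drop 10).take 10)
    ++ [specs.getD (sb % 8) ' '] ++ chars.drop 20)

-- ===== PRECONDITION & SPEC =====
def Spec_generate_modern_license_key_py (seed : String) (out : String) : Prop := out = generate_modern_license_key_py_alt seed
instance (seed : String) (out : String) : Decidable (Spec_generate_modern_license_key_py seed out) := by unfold Spec_generate_modern_license_key_py; infer_instance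

-- ===== CLAIM (what is proved, stated in full; the proofs are below) =====
def Claim_equal_generate_modern_license_key_py : Prop := ∀ (seed : String), Dom_generate_modern_license_key_py seed → Spec_generate_modern_license_key_py seed (generate_modern_license_key_py seed)

-- ===== LEMMAS AND PROOFS =====

-- exact (unreduced) sum computed by _build_checksum_value
def pvS (off mult : Nat) : List Char → Nat → Nat
  | [], _ => 0
  | c :: cs, i => (c.toNat + off) * (i + mult) + pvS off mult cs (i + 1)

-- exact weighted sum sum i*ord(c) and index sum
def pvW : List Char → Nat → Nat
  | [], _ => 0
  | c :: cs, i => i * c.toNat + pvW cs (i + 1)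

def pvI : List Char → Nat → Nat
  | [], _ => 0
  | _ :: cs, i => i + pvI cs (i + 1)

theorem pv_csA (off mult : Nat) : ∀ (l : List Char) (t i : Nat), t < 16777215 →
    (l.foldl (fun (p : Nat × Nat) c =>
        ((p.1 + (c.toNat + off) * (p.2 + mult)) % 16777215, p.2 + 1)) (t, i)).1
      = (t + pvS off mult l i) % 16777215 := by
  intro l
  induction l with
  | nil => intro t i ht; simp [pvS]; omega
  | cons c cs ih =>
    intro t i ht
    simp only [List.foldl_cons, pvS]
    rw [ih _ (i + 1) (Nat.mod_lt _ (by norm_num))]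
    omega

theorem pv_w (l : List Char) : ∀ (i a : Nat),
    (l.foldl (fun (p : Nat × Nat) c => (p.1 + 1, p.2 + p.1 * c.toNat)) (i, a)).2
      = a + pvW l i := by
  induction l with
  | nil => intro i a; simp [pvW]
  | cons c cs ih => intro i a; simp only [List.foldl_cons, pvW]; rw [ih]; ring

theorem pv_idx (l : List Char) : ∀ i : Nat,
    2 * pvI l i + l.length = l.length * (2 * i + l.length) := by
  induction l with
  | nil => intro i; simp [pvI]
  | cons c cs ih =>
    intro i
    have h := ih (i + 1)
    simp only [pvI, List.length_cons] at *
    zify at h ⊢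
    linear_combination h

theorem pv_combine (l : List Char) : ∀ i : Nat,
    pvS 11 3 l i + pvS 19 7 l i
      = 2 * pvW l i + 10 * (l.map (fun c => c.toNat)).sum + 30 * pvI l i + 166 * l.length := by
  induction l with
  | nil => intro i; simp [pvS, pvW, pvI]
  | cons c cs ih =>
    intro i
    have h := ih (i + 1)
    simp only [pvS, pvW, pvI, List.map_cons, List.sum_cons, List.length_cons] at *
    zify at h ⊢
    linear_combination h

-- A's digest equals B's closed-form digest
theorem pv_digest (l : List Char) :
    (pvChecksumA l 3 11 + pvChecksumA l 7 19 + l.length * 97) % 16777215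
      = (2 * (l.foldl (fun (p : Nat × Nat) c => (p.1 + 1, p.2 + p.1 * c.toNat)) (1, 0)).2
          + 10 * (l.map (fun c => c.toNat)).sum
          + 15 * l.length * (l.length + 1) + 263 * l.length) % 16777215 := by
  unfold pvChecksumA
  rw [pv_csA 11 3 l 0 1 (by norm_num), pv_csA 19 7 l 0 1 (by norm_num), pv_w l 1 0]
  have hc := pv_combine l 1
  have hi := pv_idx l 1
  have h30 : 30 * pvI l 1 = 15 * l.length * (l.length + 1) := by
    have : 2 * (30 * pvI l 1) = 2 * (15 * l.length * (l.length + 1)) := by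
      zify at hi ⊢; linear_combination 30 * hi
    omega
  omega

-- mod-flattening lemmas: a reduced factor inside an affine form can be unreduced
theorem pv_l (a b c : Nat) :
    (a % 16777215 * b + c) % 16777215 = (a * b + c) % 16777215 := by
  conv_lhs => rw [Nat.add_mod, Nat.mul_mod, Nat.mod_mod_of_dvd _ dvd_rfl]
  conv_rhs => rw [Nat.add_mod, Nat.mul_mod]

theorem pv_l3 (a b c d : Nat) :
    (a % 16777215 * b + c + d) % 16777215 = (a * b + c + d) % 16777215 := by
  rw [Nat.add_assoc, pv_l, ← Nat.add_assoc]

-- ===== VERDICT (by name: the statement is the Claim_ definition above) =====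
set_option maxRecDepth 100000 in
set_option maxHeartbeats 4000000 in
theorem generate_modern_license_key_py_spec : Claim_equal_generate_modern_license_key_py := by
  intro seed _
  show generate_modern_license_key_py seed = generate_modern_license_key_py_alt seed
  unfold generate_modern_license_key_py generate_modern_license_key_py_alt
  dsimp only
  rw [pv_digest]
  generalize (2 * ((seed.toList).foldl (fun (p : Nat × Nat) c => (p.1 + 1, p.2 + p.1 * c.toNat)) (1, 0)).2
      + 10 * ((seed.toList).map (fun c => c.toNat)).sum
      + 15 * (seed.toList).length * ((seed.toList).length + 1) + 263 * (seed.toList).length) % 16777215 = s0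
  simp only [show List.range 30 = [0,1,2,3,4,5,6,7,8,9,10,11,12,13,14,15,16,17,18,19,20,21,22,23,24,25,26,27,28,29] from by decide,
    List.foldl_cons, List.foldl_nil, List.map_cons, List.map_nil]
  simp only [pv_l3, pv_l]
  norm_num [pvG, pvH]
  simp only [show "@#$%&*!?".length = 8 from rfl]
  ring_nf
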